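-- pv_equiv track=rewrite | github.com/valentinensukuzonke-source/gnce-framework | gnce/gn_kernel/regimes/register.py | _coalesce_regime_id
-- ===== SOURCE A (Python) =====
-- from typing import Any, Callable, Dict, List, Optional, Tuple
--
-- def _coalesce_regime_id(spec: Dict[str, Any], kwargs: Dict[str, Any]) -> Optional[str]:
--     # Prefer explicit kwargs
--     rid = kwargs.get("regime_id") or kwargs.get("id") or kwargs.get("regime")
--     if rid:
--         return str(rid)
--     # Then spec dict
--     for k in ("regime_id", "id", "regime"):
--         if k in spec and spec[k]:
--             return str(spec[k])
--     return None
-- ===== SOURCE B (Python) =====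
-- _RANK = {"regime_id": 0, "id": 1, "regime": 2}
--
-- def _coalesce_regime_id(spec, kwargs):
--     # Single argmin scan over the data: walk all items of kwargs (priority base 0)
--     # then spec (base 3), keeping the truthy relevant entry with the lowest rank.
--     best_r, best_v = 6, None
--     for base, d in ((0, kwargs), (3, spec)):
--         for k, v in d.items():
--             r = _RANK.get(k)
--             if r is not None and v and base + r < best_r:
--                 best_r, best_v = base + r, v
--     return None if best_v is None else str(best_v)
-- ===== Notes on version B (the rewrite author's own statement) =====
-- stated objective: alternative
-- what changed: Instead of probing six (dict,key) candidates in priority order, B makes a single argmin scan over all items of kwargs then spec, keeping the truthy relevant entry with the lowest priority rank from a rank table.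
import Mathlib
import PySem

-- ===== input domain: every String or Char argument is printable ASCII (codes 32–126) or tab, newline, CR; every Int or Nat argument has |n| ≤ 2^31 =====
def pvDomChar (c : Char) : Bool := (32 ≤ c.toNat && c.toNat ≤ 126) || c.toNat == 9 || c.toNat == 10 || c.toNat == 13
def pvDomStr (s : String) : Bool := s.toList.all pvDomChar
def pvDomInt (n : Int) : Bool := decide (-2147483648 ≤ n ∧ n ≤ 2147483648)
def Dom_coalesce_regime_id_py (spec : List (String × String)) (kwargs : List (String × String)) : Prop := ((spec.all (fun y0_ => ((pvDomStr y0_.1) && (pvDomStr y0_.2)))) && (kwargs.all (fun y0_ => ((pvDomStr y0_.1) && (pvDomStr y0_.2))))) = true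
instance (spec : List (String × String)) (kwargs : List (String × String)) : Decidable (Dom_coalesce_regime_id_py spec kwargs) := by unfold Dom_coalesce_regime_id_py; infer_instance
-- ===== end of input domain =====

-- B replaces A's six priority probes (kwargs or-chain + spec key loop) by a single argmin
-- scan over all dict items with a rank table (alternative decomposition, same cost);
-- return values only, no mutation involved.

-- ===== PORT A =====
-- Python 'a or b' on Optional[str]: left operand if truthy (some nonempty string), else right.
def pvOr (a b : Option String) : Option String :=
  match a with
  | some s => if s == "" then b else some s
  | none => b

-- the for-loop over ("regime_id", "id", "regime"): 'if k in spec and spec[k]: return str(spec[k])'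
def pvSpecLoop (spec : PySem.Dict String String) : List String → Option String
  | [] => none
  | k :: ks =>
      match spec.get? k with
      | some v => if v == "" then pvSpecLoop spec ks else some v
      | none => pvSpecLoop spec ks

def coalesce_regime_id_py (spec : List (String × String)) (kwargs : List (String × String)) : Option String :=
  let kd := PySem.Dict.mk kwargs
  let rid := pvOr (kd.get? "regime_id") (pvOr (kd.get? "id") (kd.get? "regime"))
  match rid with
  | some s => if s == "" then pvSpecLoop (PySem.Dict.mk spec) ["regime_id", "id", "regime"] else some s
  | none => pvSpecLoop (PySem.Dict.mk spec) ["regime_id", "id", "regime"]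

-- ===== PORT B =====
-- _RANK = {"regime_id": 0, "id": 1, "regime": 2}
def pvRank : PySem.Dict String Int := PySem.Dict.mk [("regime_id", 0), ("id", 1), ("regime", 2)]

-- body of 'for k, v in d.items(): r = _RANK.get(k); if r is not None and v and base + r < best_r: …'
def pvStep (base : Int) (st : Int × Option String) (kv : String × String) : Int × Option String :=
  match pvRank.get? kv.1 with
  | none => st
  | some r => if kv.2 == "" then st else if base + r < st.1 then (base + r, some kv.2) else st

def pvScan (base : Int) (items : List (String × String)) (st : Int × Option String) : Int × Option String :=
  items.foldl (pvStep base) st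

def coalesce_regime_id_py_alt (spec : List (String × String)) (kwargs : List (String × String)) : Option String :=
  let st1 := pvScan 0 ((PySem.Dict.mk kwargs).items) (6, none)
  let st2 := pvScan 3 ((PySem.Dict.mk spec).items) st1
  -- 'return None if best_v is None else str(best_v)'; str(v) = v on string values
  match st2.2 with
  | none => none
  | some v => some v

-- ===== PRECONDITION & SPEC =====
-- Pre_ excludes association lists with duplicate keys: they do not denote a Python dict
-- (A's parameters are dicts, whose keys are unique), so both readings of such a list are accidental.
def Pre_coalesce_regime_id_py (spec : List (String × String)) (kwargs : List (String × String)) : Prop :=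
  (spec.map Prod.fst).Nodup ∧ (kwargs.map Prod.fst).Nodup
instance (spec : List (String × String)) (kwargs : List (String × String)) : Decidable (Pre_coalesce_regime_id_py spec kwargs) := by unfold Pre_coalesce_regime_id_py; infer_instance

def pvWitness_coalesce_regime_id_py : (List (String × String)) × (List (String × String)) :=
  ([("regime_id", "alpha")], [("id", "beta")])

def Spec_coalesce_regime_id_py (spec : List (String × String)) (kwargs : List (String × String)) (out : Option String) : Prop := out = coalesce_regime_id_py_alt spec kwargs
instance (spec : List (String × String)) (kwargs : List (String × String)) (out : Option String) : Decidable (Spec_coalesce_regime_id_py spec kwargs out) := by unfold Spec_coalesce_regime_id_py; infer_instance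

-- ===== CLAIM (what is proved, stated in full; the proofs are below) =====
def Claim_equal_coalesce_regime_id_py : Prop := ∀ (spec : List (String × String)) (kwargs : List (String × String)), Dom_coalesce_regime_id_py spec kwargs → Pre_coalesce_regime_id_py spec kwargs → Spec_coalesce_regime_id_py spec kwargs (coalesce_regime_id_py spec kwargs)

-- ===== LEMMAS AND PROOFS =====

-- first-match value of key k in an association list (what Dict.mk's get? computes, by rfl)
def fm (l : List (String × String)) (k : String) : Option String :=
  (l.find? (fun p => p.1 == k)).map Prod.snd

-- Python truthiness of an optional string
def tr : Option String → Bool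
  | none => false
  | some s => s != ""

theorem get?_mk_eq_fm (l : List (String × String)) (k : String) :
    (PySem.Dict.mk l).get? k = fm l k := rfl

theorem fm_eq_none_of_not_mem (l : List (String × String)) (k : String)
    (h : k ∉ l.map Prod.fst) : fm l k = none := by
  unfold fm
  rw [List.find?_eq_none.mpr]
  · rfl
  · intro p hp hbeq
    apply h
    have hk : p.1 = k := by simpa using hbeq
    simpa [hk] using List.mem_map_of_mem (f := Prod.fst) hp

theorem fm_cons (k : String) (v : String) (rest : List (String × String)) (key : String) :
    fm ((k, v) :: rest) key = if k == key then some v else fm rest key := by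
  by_cases h : k == key <;> simp [fm, h]

theorem scan_cons (base : Int) (kv : String × String) (rest : List (String × String))
    (st : Int × Option String) :
    pvScan base (kv :: rest) st = pvScan base rest (pvStep base st kv) := rfl

-- characterisation of the argmin scan over one dict's items (keys distinct)
theorem scan_char (base : Int) (l : List (String × String))
    (h : (l.map Prod.fst).Nodup) (t : Int) (w : Option String) :
    pvScan base l (t, w) =
      if tr (fm l "regime_id") ∧ base < t then (base, fm l "regime_id")
      else if tr (fm l "id") ∧ base + 1 < t then (base + 1, fm l "id")
      else if tr (fm l "regime") ∧ base + 2 < t then (base + 2, fm l "regime")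
      else (t, w) := by
  induction l generalizing t w with
  | nil => simp [pvScan, fm, tr]
  | cons kv rest ih =>
    obtain ⟨k, v⟩ := kv
    have hrest : (rest.map Prod.fst).Nodup := (List.nodup_cons.mp h).2
    have hknot : k ∉ rest.map Prod.fst := (List.nodup_cons.mp h).1
    rw [scan_cons]
    by_cases hk1 : k = "regime_id"
    · subst hk1
      have hr : fm rest "regime_id" = none := fm_eq_none_of_not_mem _ _ hknot
      have hrk : pvRank.get? "regime_id" = some 0 := rfl
      by_cases hv : v = "" <;> by_cases h0 : base < t <;>
        simp only [pvStep, hrk, hv, add_zero] <;>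
          simp [h0, ih hrest, fm_cons, hr, tr, hv] <;>
            split_ifs <;> simp_all
    · by_cases hk2 : k = "id"
      · subst hk2
        have hr : fm rest "id" = none := fm_eq_none_of_not_mem _ _ hknot
        have hrk : pvRank.get? "id" = some 1 := rfl
        by_cases hv : v = "" <;> by_cases h0 : base + 1 < t <;>
          simp only [pvStep, hrk, hv] <;>
            simp [h0, ih hrest, fm_cons, hr, tr, hv] <;>
              split_ifs <;> simp_all <;> omega
      · by_cases hk3 : k = "regime"
        · subst hk3
          have hr : fm rest "regime" = none := fm_eq_none_of_not_mem _ _ hknot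
          have hrk : pvRank.get? "regime" = some 2 := rfl
          by_cases hv : v = "" <;> by_cases h0 : base + 2 < t <;>
            simp only [pvStep, hrk, hv] <;>
              simp [h0, ih hrest, fm_cons, hr, tr, hv] <;>
                split_ifs <;> simp_all <;> omega
        · have hrk : pvRank.get? k = none := by
            simp [pvRank, PySem.Dict.get?, Ne.symm hk1, Ne.symm hk2, Ne.symm hk3]
          simp only [pvStep, hrk]
          rw [ih hrest]
          simp [fm_cons, hk1, hk2, hk3]

-- canonical form of A
theorem A_char (spec kwargs : List (String × String)) :
    coalesce_regime_id_py spec kwargs =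
      if tr (fm kwargs "regime_id") then fm kwargs "regime_id"
      else if tr (fm kwargs "id") then fm kwargs "id"
      else if tr (fm kwargs "regime") then fm kwargs "regime"
      else if tr (fm spec "regime_id") then fm spec "regime_id"
      else if tr (fm spec "id") then fm spec "id"
      else if tr (fm spec "regime") then fm spec "regime"
      else none := by
  unfold coalesce_regime_id_py
  simp only [get?_mk_eq_fm, pvSpecLoop, pvOr]
  rcases h1 : fm kwargs "regime_id" with _ | a <;>
    rcases h2 : fm kwargs "id" with _ | b <;>
      rcases h3 : fm kwargs "regime" with _ | c <;>
        rcases h4 : fm spec "regime_id" with _ | d <;>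
          rcases h5 : fm spec "id" with _ | e <;>
            rcases h6 : fm spec "regime" with _ | f <;>
              simp [tr] <;> split_ifs <;> simp_all

-- canonical form of B (needs distinct keys)
theorem B_char (spec kwargs : List (String × String))
    (hs : (spec.map Prod.fst).Nodup) (hk : (kwargs.map Prod.fst).Nodup) :
    coalesce_regime_id_py_alt spec kwargs =
      if tr (fm kwargs "regime_id") then fm kwargs "regime_id"
      else if tr (fm kwargs "id") then fm kwargs "id"
      else if tr (fm kwargs "regime") then fm kwargs "regime"
      else if tr (fm spec "regime_id") then fm spec "regime_id"
      else if tr (fm spec "id") then fm spec "id"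
      else if tr (fm spec "regime") then fm spec "regime"
      else none := by
  unfold coalesce_regime_id_py_alt
  rw [show (PySem.Dict.mk kwargs).items = kwargs from rfl,
      show (PySem.Dict.mk spec).items = spec from rfl,
      scan_char 0 kwargs hk 6 none]
  rcases h1 : fm kwargs "regime_id" with _ | a <;>
    rcases h2 : fm kwargs "id" with _ | b <;>
      rcases h3 : fm kwargs "regime" with _ | c <;>
        simp [tr] <;> split_ifs <;>
          rw [scan_char 3 spec hs] <;>
            rcases h4 : fm spec "regime_id" with _ | d <;>
              rcases h5 : fm spec "id" with _ | e <;>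
                rcases h6 : fm spec "regime" with _ | f <;>
                  simp [tr] <;> split_ifs <;> simp_all

-- ===== VERDICT (by name: the statement is the Claim_ definition above) =====
theorem coalesce_regime_id_py_spec : Claim_equal_coalesce_regime_id_py := by
  intro spec kwargs _ hpre
  unfold Spec_coalesce_regime_id_py
  rw [A_char, B_char spec kwargs hpre.1 hpre.2]
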